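-- pv_equiv track=rewrite | github.com/The-devop/Cipher-Labs | crypto_core.py | homophonic_sub
-- ===== SOURCE A (Python) =====
-- def _clean(text: str) -> str:
--     """Convert text to uppercase"""
--     return text.upper()
--
-- def homophonic_sub(text: str) -> str:
--     """Homophonic substitution"""
--     text = _clean(text)
--     mapping = {
--         'A': '01', 'B': '02', 'C': '03', 'D': '04', 'E': '05',
--         'F': '06', 'G': '07', 'H': '08', 'I': '09', 'J': '10',
--         'K': '11', 'L': '12', 'M': '13', 'N': '14', 'O': '15',
--         'P': '16', 'Q': '17', 'R': '18', 'S': '19', 'T': '20',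
--         'U': '21', 'V': '22', 'W': '23', 'X': '24', 'Y': '25', 'Z': '26'
--     }
--     return "".join(mapping.get(ch, "") for ch in text)
-- ===== SOURCE B (Python) =====
-- def homophonic_sub(text: str) -> str:
--     """Homophonic substitution via divide-and-conquer over index ranges:
--     no lookup table and no scan loop; halves are encoded recursively and
--     concatenated."""
--     s = text.upper()
--
--     def go(lo: int, hi: int) -> str:
--         if hi - lo <= 0:
--             return ""
--         if hi - lo == 1:
--             c = s[lo]
--             return format(ord(c) - 64, '02d') if 'A' <= c <= 'Z' else ""
--         mid = (lo + hi) // 2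
--         return go(lo, mid) + go(mid, hi)
--
--     return go(0, len(s))
-- ===== Notes on version B (the rewrite author's own statement) =====
-- stated objective: alternative
-- what changed: Replaces the 26-entry dict and the linear generator scan by a divide-and-conquer recursion over index ranges: the string is split at the midpoint, each half encoded recursively and concatenated, a single character encoded arithmetically as the zero-padded two-digit value ord(c)-64, and non-letters dropped.
import Mathlib
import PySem

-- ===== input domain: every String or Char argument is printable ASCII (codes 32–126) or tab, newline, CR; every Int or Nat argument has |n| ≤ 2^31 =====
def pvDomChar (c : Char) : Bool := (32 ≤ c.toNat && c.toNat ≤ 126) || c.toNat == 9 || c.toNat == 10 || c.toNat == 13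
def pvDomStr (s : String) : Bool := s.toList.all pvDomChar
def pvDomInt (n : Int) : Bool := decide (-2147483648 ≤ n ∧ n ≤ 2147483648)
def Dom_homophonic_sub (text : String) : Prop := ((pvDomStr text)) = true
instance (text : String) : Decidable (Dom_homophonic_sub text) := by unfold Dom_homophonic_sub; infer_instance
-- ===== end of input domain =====

-- B replaces A's 26-entry mapping dict and linear scan by a divide-and-conquer recursion:
-- split at the midpoint, encode each half recursively, encode single letters arithmetically
-- (objective: alternative).


-- ===== PORT A =====
-- _clean(text) = text.upper()
def pvClean (text : String) : String := PySem.Str.upper text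

def pvMapping : PySem.Dict Char String := PySem.Dict.ofList
  [('A', "01"), ('B', "02"), ('C', "03"), ('D', "04"), ('E', "05"),
   ('F', "06"), ('G', "07"), ('H', "08"), ('I', "09"), ('J', "10"),
   ('K', "11"), ('L', "12"), ('M', "13"), ('N', "14"), ('O', "15"),
   ('P', "16"), ('Q', "17"), ('R', "18"), ('S', "19"), ('T', "20"),
   ('U', "21"), ('V', "22"), ('W', "23"), ('X', "24"), ('Y', "25"), ('Z', "26")]

-- "".join(mapping.get(ch, "") for ch in text)
def homophonic_sub (text : String) : String :=
  let t := pvClean text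
  PySem.Str.join "" (t.toList.map (fun ch => pvMapping.getD ch ""))

-- ===== PORT B =====
-- format(ord(ch) - 64, '02d')
def pvCode (ch : Char) : String := PySem.Str.zfill (PySem.Int.toStr ((ch.toNat : Int) - 64)) 2

-- go(lo, hi): Source B's divide-and-conquer over the index range [lo, hi) of s, transcribed as a
-- recursion on the sublist s[lo:hi]; the Python split point mid = (lo+hi)//2 is exactly the
-- midpoint of the sublist, i.e. splitting it at (its length)/2.
-- fuel = the length of the range, a pure totality device (each half is strictly shorter)
def pvGo : Nat → List Char → List Char
  | 0, _ => []
  | _ + 1, [] => []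
  | _ + 1, [c] => if 'A' ≤ c ∧ c ≤ 'Z' then (pvCode c).toList else []
  | fuel + 1, c1 :: c2 :: rest =>
      let l' := c1 :: c2 :: rest
      pvGo fuel (l'.take (l'.length / 2)) ++ pvGo fuel (l'.drop (l'.length / 2))

def homophonic_sub_alt (text : String) : String :=
  String.ofList (pvGo (PySem.Str.upper text).toList.length (PySem.Str.upper text).toList)

-- ===== PRECONDITION & SPEC =====
def Spec_homophonic_sub (text : String) (out : String) : Prop := out = homophonic_sub_alt text
instance (text : String) (out : String) : Decidable (Spec_homophonic_sub text out) := by unfold Spec_homophonic_sub; infer_instance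

-- ===== CLAIM (what is proved, stated in full; the proofs are below) =====
def Claim_equal_homophonic_sub : Prop := ∀ (text : String), Dom_homophonic_sub text → Spec_homophonic_sub text (homophonic_sub text)

-- ===== LEMMAS AND PROOFS =====

-- joining with the empty separator is flattening
theorem pv_join_nil_sep (ps : List (List Char)) : PySem.Chars.join [] ps = ps.flatten := by
  simp [PySem.Chars.join, List.intercalate]
  induction ps with
  | nil => rfl
  | cons h t ih =>
    cases t with
    | nil => simp
    | cons h' t' => simpa [List.intersperse] using ih

-- Char order is the order of the underlying code points
theorem pv_le_iff (a b : Char) : a ≤ b ↔ a.toNat ≤ b.toNat := by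
  rw [Char.le_def, UInt32.le_iff_toNat_le]; rfl

-- on each of the 26 letters, the dict lookup equals B's arithmetic code
theorem pv_letters : ∀ m : Fin 26,
    pvMapping.getD (Char.ofNat (65 + m.val)) "" = pvCode (Char.ofNat (65 + m.val)) := by
  decide

-- off the letters, the dict lookup misses every key and falls back to ""
theorem pv_not_letter (c : Char) (h : ¬ (65 ≤ c.toNat ∧ c.toNat ≤ 90)) :
    pvMapping.getD c "" = "" := by
  have hne : ∀ k : Char, 65 ≤ k.toNat → k.toNat ≤ 90 → (k == c) = false := by
    intro k h1 h2
    simp only [beq_eq_false_iff_ne]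
    rintro rfl
    exact h ⟨h1, h2⟩
  have hm : pvMapping = PySem.Dict.mk
    [('A', "01"), ('B', "02"), ('C', "03"), ('D', "04"), ('E', "05"),
     ('F', "06"), ('G', "07"), ('H', "08"), ('I', "09"), ('J', "10"),
     ('K', "11"), ('L', "12"), ('M', "13"), ('N', "14"), ('O', "15"),
     ('P', "16"), ('Q', "17"), ('R', "18"), ('S', "19"), ('T', "20"),
     ('U', "21"), ('V', "22"), ('W', "23"), ('X', "24"), ('Y', "25"), ('Z', "26")] := by rfl
  rw [PySem.Dict.getD_eq_get?_getD, hm]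
  simp only [PySem.Dict.get?_mk_cons]
  rw [hne 'A' (by decide) (by decide), hne 'B' (by decide) (by decide), hne 'C' (by decide) (by decide),
      hne 'D' (by decide) (by decide), hne 'E' (by decide) (by decide), hne 'F' (by decide) (by decide),
      hne 'G' (by decide) (by decide), hne 'H' (by decide) (by decide), hne 'I' (by decide) (by decide),
      hne 'J' (by decide) (by decide), hne 'K' (by decide) (by decide), hne 'L' (by decide) (by decide),
      hne 'M' (by decide) (by decide), hne 'N' (by decide) (by decide), hne 'O' (by decide) (by decide),
      hne 'P' (by decide) (by decide), hne 'Q' (by decide) (by decide), hne 'R' (by decide) (by decide),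
      hne 'S' (by decide) (by decide), hne 'T' (by decide) (by decide), hne 'U' (by decide) (by decide),
      hne 'V' (by decide) (by decide), hne 'W' (by decide) (by decide), hne 'X' (by decide) (by decide),
      hne 'Y' (by decide) (by decide), hne 'Z' (by decide) (by decide)]
  rfl

-- per character, the dict lookup equals B's arithmetic code (or "" off the letters)
theorem pv_char_eq (c : Char) :
    pvMapping.getD c "" = (if 'A' ≤ c ∧ c ≤ 'Z' then pvCode c else "") := by
  by_cases h : 'A' ≤ c ∧ c ≤ 'Z'
  · rw [if_pos h]
    obtain ⟨h1, h2⟩ := h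
    rw [pv_le_iff] at h1 h2
    have hA : ('A' : Char).toNat = 65 := by decide
    have hZ : ('Z' : Char).toNat = 90 := by decide
    have hc : c = Char.ofNat (65 + (c.toNat - 65)) := by
      have : 65 + (c.toNat - 65) = c.toNat := by omega
      rw [this, Char.ofNat_toNat]
    rw [hc]
    exact pv_letters ⟨c.toNat - 65, by omega⟩
  · rw [if_neg h]
    apply pv_not_letter
    intro ⟨h1, h2⟩
    exact h ⟨by rw [pv_le_iff]; simpa using h1, by rw [pv_le_iff]; simpa using h2⟩

-- the linear "flatten of mapped dict lookups" view of A, rewritten with the arithmetic code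
theorem pv_flatten_eq (l : List Char) :
    (l.map (fun ch => (pvMapping.getD ch "").toList)).flatten =
      ((l.filter (fun ch => decide ('A' ≤ ch ∧ ch ≤ 'Z'))).map (fun ch => (pvCode ch).toList)).flatten := by
  induction l with
  | nil => simp only [List.map_nil, List.filter_nil, List.flatten_nil]
  | cons c t ih =>
    rw [List.map_cons, List.flatten_cons, pv_char_eq c, List.filter_cons]
    by_cases hl : 'A' ≤ c ∧ c ≤ 'Z'
    · rw [if_pos hl, if_pos (by simpa using hl), List.map_cons, List.flatten_cons, ih]
    · rw [if_neg hl, if_neg (by simpa using hl), ih]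
      simp

-- abbreviation for the linear specification of the encoding
def pvSpecEnc (l : List Char) : List Char :=
  ((l.filter (fun ch => decide ('A' ≤ ch ∧ ch ≤ 'Z'))).map (fun ch => (pvCode ch).toList)).flatten

theorem pvSpecEnc_append (l1 l2 : List Char) :
    pvSpecEnc (l1 ++ l2) = pvSpecEnc l1 ++ pvSpecEnc l2 := by
  simp [pvSpecEnc]

-- with enough fuel, the divide-and-conquer recursion computes the linear specification
theorem pvGo_eq_aux : ∀ fuel : ℕ, ∀ l : List Char, l.length ≤ fuel → pvGo fuel l = pvSpecEnc l := by
  intro fuel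
  induction fuel with
  | zero =>
    intro l hl
    have : l = [] := List.eq_nil_of_length_eq_zero (by omega)
    subst this; simp [pvGo, pvSpecEnc]
  | succ n ih =>
    intro l hl
    match l with
    | [] => simp [pvGo, pvSpecEnc]
    | [c] =>
      simp only [pvGo, pvSpecEnc, List.filter_cons, List.filter_nil]
      by_cases h : 'A' ≤ c ∧ c ≤ 'Z'
      · rw [if_pos h, if_pos (by simpa using h)]; simp
      · rw [if_neg h, if_neg (by simpa using h)]; simp
    | c1 :: c2 :: rest =>
      rw [pvGo]
      have hlen : rest.length + 2 ≤ n + 1 := by simpa using hl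
      have h1 : ((c1 :: c2 :: rest).take ((c1 :: c2 :: rest).length / 2)).length ≤ n := by
        simp only [List.length_take, List.length_cons]; omega
      have h2 : ((c1 :: c2 :: rest).drop ((c1 :: c2 :: rest).length / 2)).length ≤ n := by
        simp only [List.length_drop, List.length_cons]; omega
      rw [ih _ h1, ih _ h2, ← pvSpecEnc_append, List.take_append_drop]

theorem pvGo_eq (l : List Char) : pvGo l.length l = pvSpecEnc l :=
  pvGo_eq_aux l.length l le_rfl

-- ===== VERDICT (by name: the statement is the Claim_ definition above) =====
theorem homophonic_sub_spec : Claim_equal_homophonic_sub := by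
  intro text hdom
  unfold Spec_homophonic_sub homophonic_sub homophonic_sub_alt pvClean
  dsimp only
  apply String.toList_inj.mp
  simp only [PySem.Str.join, String.toList_ofList, List.map_map]
  have hnil : ("" : String).toList = [] := rfl
  rw [hnil, pv_join_nil_sep, pvGo_eq]
  simpa [Function.comp, pvSpecEnc] using pv_flatten_eq (PySem.Str.upper text).toList
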